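-- pv_equiv track=rewrite | github.com/Avorthoren/timus1597_py | main.py | floors_n
-- ===== SOURCE A (Python) =====
-- import math
--
-- def floors_n(tries: int, eggs: int) -> int:
-- 	"""Total number of floors that can be checked with given number of eggs in
-- 	given number of tries. Straightforward approach.
-- 	"""
-- 	if tries < 0 or eggs < 0:
-- 		raise ValueError
--
-- 	# We can not break more eggs than there are tries.
-- 	eggs = min(tries, eggs)
--
-- 	if not tries or not eggs:
-- 		return 0
--
-- 	if tries == 1 or eggs == 1:
-- 		return tries
--
-- 	return sum(
-- 		math.comb(tries, e)        # Binomial(tries, e)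
-- 		for e in range(1, eggs+1)  # 1..eggs
-- 	)
-- ===== SOURCE B (Python) =====
-- def floors_n(tries: int, eggs: int) -> int:
-- 	"""Total number of floors checkable with given eggs/tries.
--
-- 	Never computes a binomial coefficient: evaluates the integer
-- 	k! * sum_{e=1}^{k} C(tries, e)  (k = min(tries, eggs))
-- 	by a Horner-style backward recurrence over e = k..1
-- 	(acc <- w + (tries - e) * acc,  w <- w * e, so w ends as k!),
-- 	then performs one exact division by k! at the end.
-- 	"""
-- 	if tries < 0 or eggs < 0:
-- 		raise ValueError
--
-- 	m = min(tries, eggs)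
-- 	acc, w = 0, 1
-- 	for e in range(m, 0, -1):
-- 		acc, w = w + (tries - e) * acc, w * e
-- 	return tries * acc // w
-- ===== Notes on version B (the rewrite author's own statement) =====
-- stated objective: faster
-- what changed: B never computes a binomial coefficient: instead of summing math.comb terms it evaluates k!*sum_{e=1..k}C(tries,e) by a Horner-style backward recurrence (acc <- w + (tries-e)*acc, w <- w*e for e=k..1) and performs one exact division by k! at the end.
import Mathlib
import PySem

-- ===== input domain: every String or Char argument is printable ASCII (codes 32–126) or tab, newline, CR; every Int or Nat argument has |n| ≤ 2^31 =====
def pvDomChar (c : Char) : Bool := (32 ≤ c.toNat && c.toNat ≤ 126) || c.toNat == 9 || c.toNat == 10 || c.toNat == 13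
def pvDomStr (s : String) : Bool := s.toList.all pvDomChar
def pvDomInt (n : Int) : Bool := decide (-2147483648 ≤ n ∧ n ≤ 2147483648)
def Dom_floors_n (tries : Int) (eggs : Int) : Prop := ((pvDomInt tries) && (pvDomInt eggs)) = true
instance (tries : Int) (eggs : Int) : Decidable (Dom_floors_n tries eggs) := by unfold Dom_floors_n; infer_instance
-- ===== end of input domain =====

-- B replaces A's sum of math.comb terms by a Horner-style backward recurrence computing
-- k!*sum C(tries,e) with no binomial coefficients and one exact division by k! at the end
-- (measured faster at the large sizes).


-- ===== PORT A =====
-- literal port of A: special-case branches, then sum of math.comb(tries, e) for e in 1..eggs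
def floors_n (tries : Int) (eggs : Int) : Int :=
  let eggs2 := min tries eggs
  if tries = 0 ∨ eggs2 = 0 then 0
  else if tries = 1 ∨ eggs2 = 1 then tries
  else (PySem.List.pyRange 1 (eggs2 + 1) 1).foldl
    (fun acc e => acc + (Nat.choose tries.toNat e.toNat : Int)) 0

-- ===== PORT B =====
-- port of B: Horner-style loop over e = m..1 with state (acc, w); w ends as m!,
-- and tries*acc = m! * (total); one floor division (exact here) at the end
def floors_n_alt (tries : Int) (eggs : Int) : Int :=
  let m := min tries eggs
  let st := (PySem.List.pyRange m 0 (-1)).foldl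
    (fun (st : Int × Int) e => (st.2 + (tries - e) * st.1, st.2 * e)) ((0 : Int), (1 : Int))
  PySem.Int.floordiv (tries * st.1) st.2

-- ===== PRECONDITION & SPEC =====
-- A raises ValueError exactly when tries < 0 or eggs < 0; Pre_ excludes those inputs.
def Pre_floors_n (tries : Int) (eggs : Int) : Prop := 0 ≤ tries ∧ 0 ≤ eggs
instance (tries : Int) (eggs : Int) : Decidable (Pre_floors_n tries eggs) := by unfold Pre_floors_n; infer_instance
def pvWitness_floors_n : Int × Int := (5, 3)

def Spec_floors_n (tries : Int) (eggs : Int) (out : Int) : Prop := out = floors_n_alt tries eggs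
instance (tries : Int) (eggs : Int) (out : Int) : Decidable (Spec_floors_n tries eggs out) := by unfold Spec_floors_n; infer_instance

-- ===== CLAIM (what is proved, stated in full; the proofs are below) =====
def Claim_equal_floors_n : Prop := ∀ (tries : Int) (eggs : Int), Dom_floors_n tries eggs → Pre_floors_n tries eggs → Spec_floors_n tries eggs (floors_n tries eggs)

-- ===== LEMMAS AND PROOFS =====

-- sum of binomials C(n, e) for e = 1..k, the common value of both programs
def binomSum (n k : Nat) : Int :=
  ((List.range k).map (fun i => (Nat.choose n (i + 1) : Int))).sum

theorem binomSum_succ (n k : Nat) :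
    binomSum n (k + 1) = binomSum n k + (Nat.choose n (k + 1) : Int) := by
  simp [binomSum, List.range_succ]

-- the two linear coefficients of B's loop: final acc = alphaP·acc₀ + betaP·w₀
def alphaP (n : Int) : Nat → Int
  | 0 => 1
  | a + 1 => (n - (a + 1)) * alphaP n a

def betaP (n : Int) : Nat → Int
  | 0 => 0
  | a + 1 => alphaP n a + (a + 1) * betaP n a

-- B's fold over e = k..1 is linear in the start state, with coefficients alphaP/betaP
theorem bFold_eq (n : Int) (k : Nat) : ∀ st : Int × Int,
    ((PySem.List.pyRange 1 ((k : Int) + 1) 1).reverse).foldl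
      (fun (st : Int × Int) e => (st.2 + (n - e) * st.1, st.2 * e)) st
    = (alphaP n k * st.1 + betaP n k * st.2, (Nat.factorial k : Int) * st.2) := by
  induction k with
  | zero => intro st; simp [PySem.List.pyRange, alphaP, betaP, Nat.factorial]
  | succ k ih =>
    intro st
    have hcast : (((k + 1 : Nat) : Int) + 1) = ((k : Int) + 1 + 1) := by push_cast; ring
    rw [hcast, PySem.List.pyRange_one_succ_right (by omega), List.reverse_append]
    simp only [List.reverse_singleton, List.singleton_append, List.foldl_cons]
    rw [ih]
    simp only [alphaP, betaP, Nat.factorial, Prod.mk.injEq]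
    constructor
    · ring
    · push_cast; ring

-- n · alphaP n a is the descending factorial n(n-1)⋯(n-a), as long as a + 1 ≤ n
theorem alphaP_desc (n : Nat) : ∀ a : Nat, a + 1 ≤ n →
    (n : Int) * alphaP (n : Int) a = (Nat.descFactorial n (a + 1) : Int) := by
  intro a
  induction a with
  | zero => intro _; simp [alphaP, Nat.descFactorial]
  | succ a ih =>
    intro h
    have ha : a + 1 ≤ n := by omega
    rw [Nat.descFactorial_succ]
    push_cast [Nat.cast_sub ha]
    rw [← ih ha]
    simp only [alphaP]
    ring

-- the key identity: n · betaP n k = k! · Σ_{e=1}^k C(n,e)  (k ≤ n)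
theorem betaP_eq (n : Nat) : ∀ k : Nat, k ≤ n →
    (n : Int) * betaP (n : Int) k = (Nat.factorial k : Int) * binomSum n k := by
  intro k
  induction k with
  | zero => intro _; simp [betaP, binomSum, Nat.factorial]
  | succ k ih =>
    intro h
    have hk : k ≤ n := by omega
    have hdesc := alphaP_desc n k h
    have hchoose : (Nat.descFactorial n (k + 1) : Int)
        = (Nat.factorial (k + 1) : Int) * (Nat.choose n (k + 1) : Int) := by
      exact_mod_cast congrArg (Nat.cast (R := Int)) (Nat.descFactorial_eq_factorial_mul_choose n (k + 1))
    calc (n : Int) * betaP (n : Int) (k + 1)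
        = (n : Int) * alphaP (n : Int) k + ((k : Int) + 1) * ((n : Int) * betaP (n : Int) k) := by
          simp only [betaP]; ring
      _ = (Nat.factorial (k + 1) : Int) * (Nat.choose n (k + 1) : Int)
          + ((k : Int) + 1) * ((Nat.factorial k : Int) * binomSum n k) := by
          rw [hdesc, hchoose, ih hk]
      _ = (Nat.factorial (k + 1) : Int) * binomSum n (k + 1) := by
          rw [binomSum_succ]
          simp only [Nat.factorial_succ]; push_cast; ring

-- A's fold over 1..k computes binomSum n k (for nonnegative e's, e.toNat = e)
theorem aFold_eq (n k : Nat) :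
    (PySem.List.pyRange 1 ((k : Int) + 1) 1).foldl
      (fun acc e => acc + (Nat.choose n e.toNat : Int)) 0
    = binomSum n k := by
  induction k with
  | zero => simp [PySem.List.pyRange, binomSum]
  | succ k ih =>
    have hcast : ((k : Int) + 1 + 1) = ((k + 1 : Nat) : Int) + 1 := by push_cast; ring
    rw [← hcast, PySem.List.pyRange_one_succ_right (by omega), List.foldl_append, ih]
    have : ((k : Int) + 1).toNat = k + 1 := by omega
    simp [binomSum_succ, this]

-- B's value is binomSum n m for m = min(tries, eggs), via the Horner coefficients
theorem floors_n_alt_eq (n m : Nat) (hmn : m ≤ n) (eggs : Int)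
    (hm : min (n : Int) eggs = (m : Int)) :
    floors_n_alt (n : Int) eggs = binomSum n m := by
  unfold floors_n_alt
  rw [hm]
  simp only [PySem.List.pyRange_neg_one_eq_reverse, zero_add]
  rw [bFold_eq (n : Int) m]
  simp only [mul_zero, mul_one, zero_add]
  rw [betaP_eq n m hmn]
  have hfac : (0 : Int) < (Nat.factorial m : Int) := by exact_mod_cast Nat.factorial_pos m
  rw [PySem.Int.floordiv_eq_ediv_of_pos hfac,
    Int.mul_ediv_cancel_left _ (ne_of_gt hfac)]

-- ===== VERDICT (by name: the statement is the Claim_ definition above) =====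
theorem floors_n_spec : Claim_equal_floors_n := by
  intro tries eggs _ hpre
  obtain ⟨ht, he⟩ := hpre
  unfold Spec_floors_n
  obtain ⟨n, rfl⟩ : ∃ n : Nat, tries = (n : Int) := ⟨tries.toNat, (Int.toNat_of_nonneg ht).symm⟩
  set e2 := min (n : Int) eggs with he2
  have he2n : 0 ≤ e2 := le_min (by positivity) he
  have he2t : e2 ≤ (n : Int) := min_le_left _ _
  obtain ⟨m, hm⟩ : ∃ m : Nat, e2 = (m : Int) := ⟨e2.toNat, (Int.toNat_of_nonneg he2n).symm⟩
  have hmn : m ≤ n := by exact_mod_cast hm ▸ he2t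
  rw [floors_n_alt_eq n m hmn eggs (by rw [← he2, hm])]
  unfold floors_n
  rw [← he2]
  dsimp only
  split_ifs with h1 h2
  · -- A returns 0; then m = 0
    have hm0 : m = 0 := by
      rcases h1 with h | h
      · have : n = 0 := by exact_mod_cast h
        omega
      · rw [hm] at h; exact_mod_cast h
    simp [hm0, binomSum]
  · -- A returns tries; then m = 1 (since m ≤ n and the first branch failed)
    have hm1 : m = 1 := by
      rcases h2 with h | h
      · have hn1 : n = 1 := by exact_mod_cast h
        have hmne : m ≠ 0 := by
          intro h0
          exact h1 (Or.inr (by rw [hm, h0]; rfl))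
        omega
      · rw [hm] at h
        exact_mod_cast h
    simp [hm1, binomSum]
  · -- general case: A's fold equals binomSum n m too
    rw [hm]
    simp only [Int.toNat_natCast]
    exact aFold_eq n m
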